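-- pv_equiv track=rewrite | github.com/alphaninja27/Hackerrank-solutions | Problem Solving/Larry's Array.py | larrysArray
-- ===== SOURCE A (Python) =====
-- def larrysArray(A):
--     # Write your code here
--     inversions = 0
--     for i in range(len(A)):
--         for j in range(i+1, len(A)):
--             if A[i] > A[j]:
--                 inversions += 1
--
--     # If the number of inversions is odd, the array cannot be sorted
--     if inversions % 2 == 1:
--         return "NO"
--
--     # If the number of inversions is even, the array can be sorted
--     return "YES"
-- ===== SOURCE B (Python) =====
-- def larrysArray(A):
--     # Count inversions with merge sort (O(n log n)) and test parity.
--     def merge(l, r):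
--         m = []
--         c = 0
--         i = j = 0
--         while i < len(l) and j < len(r):
--             if l[i] <= r[j]:
--                 m.append(l[i]); i += 1
--             else:
--                 m.append(r[j]); c += len(l) - i; j += 1
--         m += l[i:]
--         m += r[j:]
--         return m, c
--     def msort(xs):
--         if len(xs) <= 1:
--             return xs, 0
--         n = len(xs) // 2
--         l, c1 = msort(xs[:n])
--         r, c2 = msort(xs[n:])
--         m, c3 = merge(l, r)
--         return m, c1 + c2 + c3
--     _, inv = msort(A)
--     return "NO" if inv % 2 == 1 else "YES"
-- ===== Notes on version B (the rewrite author's own statement) =====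
-- stated objective: faster
-- what changed: Replaces the quadratic double loop over index pairs by a merge-sort that counts inversions while merging, then tests the same parity.
import Mathlib
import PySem

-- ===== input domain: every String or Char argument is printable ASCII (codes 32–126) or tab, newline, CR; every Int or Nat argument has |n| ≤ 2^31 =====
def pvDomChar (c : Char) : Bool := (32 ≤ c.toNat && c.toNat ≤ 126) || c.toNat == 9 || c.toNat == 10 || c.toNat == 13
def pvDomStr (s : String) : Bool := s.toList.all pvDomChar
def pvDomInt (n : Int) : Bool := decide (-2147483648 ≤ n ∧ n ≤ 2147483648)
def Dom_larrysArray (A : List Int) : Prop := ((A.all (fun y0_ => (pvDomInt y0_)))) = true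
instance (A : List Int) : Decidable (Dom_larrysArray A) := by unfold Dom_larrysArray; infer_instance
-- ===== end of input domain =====

-- B replaces A's quadratic double loop by a merge sort that counts inversions while merging (asymptotically faster); same parity answer.

-- ===== PORT A =====
def larrysArray (A : List Int) : String :=
  let inversions : Int :=
    (PySem.List.pyRange 0 (A.length : Int) 1).foldl (fun inv i =>
      (PySem.List.pyRange (i + 1) (A.length : Int) 1).foldl (fun inv j =>
        if PySem.List.pyGetD A i 0 > PySem.List.pyGetD A j 0 then inv + 1 else inv) inv) 0
  if PySem.Int.mod inversions 2 == 1 then "NO" else "YES"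

-- ===== PORT B =====
-- merge of Source B: the while loop as structural recursion on the two fronts; c += len(l) - i is the remaining-left length
def pvMerge : List Int → List Int → List Int × Nat
  | [], r => (r, 0)
  | x :: l, [] => (x :: l, 0)
  | x :: l, y :: r =>
    if x ≤ y then
      let p := pvMerge l (y :: r); (x :: p.1, p.2)
    else
      let p := pvMerge (x :: l) r; (y :: p.1, p.2 + (l.length + 1))
termination_by l r => l.length + r.length

def pvMsort (xs : List Int) : List Int × Nat :=
  if _h : xs.length ≤ 1 then (xs, 0)
  else
    let n := xs.length / 2
    let p1 := pvMsort (xs.take n)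
    let p2 := pvMsort (xs.drop n)
    let p3 := pvMerge p1.1 p2.1
    (p3.1, p1.2 + p2.2 + p3.2)
termination_by xs.length
decreasing_by
  · simp only [List.length_take]; omega
  · simp only [List.length_drop]; omega

def larrysArray_alt (A : List Int) : String :=
  if (pvMsort A).2 % 2 == 1 then "NO" else "YES"

-- ===== PRECONDITION & SPEC =====
def Spec_larrysArray (A : List Int) (out : String) : Prop := out = larrysArray_alt A
instance (A : List Int) (out : String) : Decidable (Spec_larrysArray A out) := by unfold Spec_larrysArray; infer_instance

-- ===== CLAIM (what is proved, stated in full; the proofs are below) =====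
def Claim_equal_larrysArray : Prop := ∀ (A : List Int), Dom_larrysArray A → Spec_larrysArray A (larrysArray A)

-- ===== LEMMAS AND PROOFS =====

/-- `pvCnt x ys` = number of elements of `ys` smaller than `x`. -/
def pvCnt (x : Int) (ys : List Int) : Nat := ys.countP (fun y => decide (y < x))

/-- inversion count of a list -/
def pvInv : List Int → Nat
  | [] => 0
  | x :: xs => pvCnt x xs + pvInv xs

/-- cross inversions: pairs (x ∈ l, y ∈ r) with y < x -/
def pvCross (l r : List Int) : Nat := (l.map (fun x => pvCnt x r)).sum

lemma pvCnt_perm {r r' : List Int} (h : r.Perm r') (x : Int) : pvCnt x r = pvCnt x r' :=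
  h.countP_eq _

lemma pvCross_perm {l l' r r' : List Int} (hl : l.Perm l') (hr : r.Perm r') :
    pvCross l r = pvCross l' r' := by
  unfold pvCross
  rw [(hl.map (fun x => pvCnt x r)).sum_eq]
  congr 1
  exact List.map_congr_left fun x _ => pvCnt_perm hr x

lemma pvCnt_append (x : Int) (l r : List Int) :
    pvCnt x (l ++ r) = pvCnt x l + pvCnt x r := by
  simp [pvCnt, List.countP_append]

lemma pvInv_append (l r : List Int) :
    pvInv (l ++ r) = pvInv l + pvInv r + pvCross l r := by
  induction l with
  | nil => simp [pvInv, pvCross]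
  | cons x l ih =>
    simp only [List.cons_append, pvInv, ih, pvCnt_append, pvCross, List.map_cons, List.sum_cons]
    omega

lemma pvMerge_perm : ∀ (l r : List Int), (pvMerge l r).1.Perm (l ++ r) := by
  intro l r
  fun_induction pvMerge l r with
  | case1 r => simp
  | case2 x l => simp
  | case3 x l y r h p ih =>
    simp only [p]
    exact (ih.cons x).trans (by simp)
  | case4 x l y r h p ih =>
    simp only [p]
    exact (ih.cons y).trans List.perm_middle.symm

lemma pvMerge_sorted : ∀ (l r : List Int), l.Pairwise (· ≤ ·) → r.Pairwise (· ≤ ·) →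
    (pvMerge l r).1.Pairwise (· ≤ ·) := by
  intro l r
  fun_induction pvMerge l r with
  | case1 r => exact fun _ h => h
  | case2 x l => exact fun h _ => h
  | case3 x l y r h p ih =>
    intro hl hr
    simp only [p]
    rw [List.pairwise_cons] at hl ⊢
    refine ⟨?_, ih hl.2 hr⟩
    intro a ha
    rcases ((pvMerge_perm l (y :: r)).mem_iff.mp ha) with hmem
    rcases List.mem_append.mp hmem with h1 | h2
    · exact hl.1 a h1
    · rcases List.mem_cons.mp h2 with rfl | h3
      · exact h
      · exact le_trans h ((List.pairwise_cons.mp hr).1 a h3)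
  | case4 x l y r h p ih =>
    intro hl hr
    simp only [p]
    rw [List.pairwise_cons] at hr ⊢
    refine ⟨?_, ih hl hr.2⟩
    intro a ha
    have hyx : y ≤ x := le_of_lt (lt_of_not_ge h)
    rcases ((pvMerge_perm (x :: l) r).mem_iff.mp ha) with hmem
    rcases List.mem_append.mp hmem with h1 | h2
    · rcases List.mem_cons.mp h1 with rfl | h3
      · exact hyx
      · exact le_trans hyx ((List.pairwise_cons.mp hl).1 a h3)
    · exact hr.1 a h2

lemma sum_map_add_one (l : List Int) (f : Int → Nat) :
    (l.map (fun z => f z + 1)).sum = (l.map f).sum + l.length := by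
  induction l with
  | nil => simp
  | cons a l ih => simp [ih]; omega

lemma pvMerge_count : ∀ (l r : List Int), l.Pairwise (· ≤ ·) → r.Pairwise (· ≤ ·) →
    (pvMerge l r).2 = pvCross l r := by
  intro l r
  fun_induction pvMerge l r with
  | case1 r => intro _ _; simp [pvCross]
  | case2 x l => intro _ _; simp [pvCross, pvCnt]
  | case3 x l y r h p ih =>
    intro hl hr
    simp only [p]
    rw [List.pairwise_cons] at hl
    have hcnt : pvCnt x (y :: r) = 0 := by
      apply List.countP_eq_zero.mpr
      intro b hb
      simp only [decide_eq_true_eq, not_lt] at *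
      rcases List.mem_cons.mp hb with rfl | h3
      · simpa using h
      · simpa using le_trans h ((List.pairwise_cons.mp hr).1 b h3)
    simp only [pvCross, List.map_cons, List.sum_cons, hcnt, Nat.zero_add]
    exact ih hl.2 hr
  | case4 x l y r h p ih =>
    intro hl hr
    simp only [p]
    rw [List.pairwise_cons] at hr
    have hpt : ∀ z ∈ x :: l, pvCnt z (y :: r) = pvCnt z r + 1 := by
      intro z hz
      have hyz : y < z := by
        rcases List.mem_cons.mp hz with rfl | h3
        · exact lt_of_not_ge h
        · exact lt_of_lt_of_le (lt_of_not_ge h) ((List.pairwise_cons.mp hl).1 z h3)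
      simp [pvCnt, hyz]
    calc (pvMerge (x :: l) r).2 + (l.length + 1)
        = pvCross (x :: l) r + (x :: l).length := by rw [ih hl hr.2]; rfl
      _ = ((x :: l).map (fun z => pvCnt z r + 1)).sum := by
            rw [sum_map_add_one]; rfl
      _ = pvCross (x :: l) (y :: r) := by
            unfold pvCross
            exact congrArg List.sum (List.map_congr_left (fun z hz => hpt z hz)).symm

lemma pvMsort_spec : ∀ (xs : List Int),
    (pvMsort xs).1.Perm xs ∧ (pvMsort xs).1.Pairwise (· ≤ ·) ∧ (pvMsort xs).2 = pvInv xs := by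
  intro xs
  refine pvMsort.induct
    (fun xs => (pvMsort xs).1.Perm xs ∧ (pvMsort xs).1.Pairwise (· ≤ ·) ∧ (pvMsort xs).2 = pvInv xs)
    ?_ ?_ xs
  · intro xs h
    rw [pvMsort]
    simp only [dif_pos h]
    refine ⟨List.Perm.refl _, ?_, ?_⟩
    · match xs, h with
      | [], _ => simp
      | [a], _ => simp
    · match xs, h with
      | [], _ => simp [pvInv]
      | [a], _ => simp [pvInv, pvCnt]
  · intro xs h n ih1 ih2
    have ih1' : (pvMsort (xs.take n)).1.Perm (xs.take n) ∧
        (pvMsort (xs.take n)).1.Pairwise (· ≤ ·) ∧ (pvMsort (xs.take n)).2 = pvInv (xs.take n) := ih1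
    have ih2' : (pvMsort (xs.drop n)).1.Perm (xs.drop n) ∧
        (pvMsort (xs.drop n)).1.Pairwise (· ≤ ·) ∧ (pvMsort (xs.drop n)).2 = pvInv (xs.drop n) := ih2
    obtain ⟨perm1, sort1, cnt1⟩ := ih1'
    obtain ⟨perm2, sort2, cnt2⟩ := ih2'
    rw [pvMsort.eq_def]
    simp only [dif_neg h]
    refine ⟨?_, ?_, ?_⟩
    · exact (pvMerge_perm _ _).trans ((perm1.append perm2).trans (by rw [List.take_append_drop]))
    · exact pvMerge_sorted _ _ sort1 sort2
    · have hc3 : (pvMerge (pvMsort (xs.take n)).1 (pvMsort (xs.drop n)).1).2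
          = pvCross (xs.take n) (xs.drop n) := by
        rw [pvMerge_count _ _ sort1 sort2]
        exact pvCross_perm perm1 perm2
      have hap := pvInv_append (xs.take n) (xs.drop n)
      rw [List.take_append_drop] at hap
      rw [hc3, cnt1, cnt2, hap]

lemma sum_cnt : ∀ (A : List Int),
    ((List.range A.length).map (fun k => (pvCnt (A.getD k 0) (A.drop (k + 1)) : Int))).sum
      = (pvInv A : Int) := by
  intro A
  induction A with
  | nil => simp [pvInv]
  | cons a A ih =>
    rw [List.length_cons, List.range_succ_eq_map, List.map_cons, List.map_map, List.sum_cons]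
    have : ((List.range A.length).map
        ((fun k => (pvCnt ((a :: A).getD k 0) ((a :: A).drop (k + 1)) : Int)) ∘ Nat.succ))
        = (List.range A.length).map (fun k => (pvCnt (A.getD k 0) (A.drop (k + 1)) : Int)) := by
      apply List.map_congr_left
      intro k hk
      simp [Function.comp, List.getD]
    rw [this, ih]
    simp [pvInv]

-- A's double loop computes pvInv
lemma loopA_eq_pvInv (A : List Int) :
    (PySem.List.pyRange 0 (A.length : Int) 1).foldl (fun inv i =>
      (PySem.List.pyRange (i + 1) (A.length : Int) 1).foldl (fun inv j =>
        if PySem.List.pyGetD A i 0 > PySem.List.pyGetD A j 0 then inv + 1 else inv) inv) 0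
    = (pvInv A : Int) := by
  rw [PySem.List.foldl_congr_mem _ _
      (fun inv i => inv + (pvCnt (PySem.List.pyGetD A i 0) (A.drop (i + 1).toNat) : Int)) 0 ?_]
  · rw [PySem.List.foldl_add, PySem.List.pyRange_zero_nat, List.map_map, Int.zero_add]
    rw [List.map_congr_left (g := fun k => (pvCnt (A.getD k 0) (A.drop (k + 1)) : Int)) ?_]
    · exact sum_cnt A
    · intro k hk
      simp only [Function.comp]
      have h1 : PySem.List.pyGetD A ((k : Int)) 0 = A.getD k 0 := PySem.List.pyGetD_natCast A k 0
      have h2 : ((k : Int) + 1).toNat = k + 1 := by omega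
      rw [h1, h2]
  · intro inv i hi
    have hi0 : (0:Int) ≤ i + 1 := by
      have := (PySem.List.mem_pyRange_one.mp hi).1; omega
    rw [PySem.List.foldl_pyRange_pyGetD' A 0
        (fun acc y => if PySem.List.pyGetD A i 0 > y then acc + 1 else acc) inv hi0]
    rw [PySem.List.foldl_ite_add_one (fun y => PySem.List.pyGetD A i 0 > y)]
    rfl

-- ===== VERDICT (by name: the statement is the Claim_ definition above) =====
theorem larrysArray_spec : Claim_equal_larrysArray := by
  intro A _
  unfold Spec_larrysArray larrysArray larrysArray_alt
  rw [loopA_eq_pvInv, (pvMsort_spec A).2.2]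
  have : (PySem.Int.mod ((pvInv A : Int)) 2 == 1) = (pvInv A % 2 == 1) := by
    rw [show (2:Int) = ((2:Nat):Int) from rfl, PySem.Int.mod_natCast]
    rcases Nat.mod_two_eq_zero_or_one (pvInv A) with h | h <;> simp [h]
  simp only [this]
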